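-- pv_equiv track=rewrite | github.com/hannulatuomas/AI_Playground | AI Agents/ai-coder-cli/agents/languages/python/code_editor.py | _apply_pep8_formatting
-- ===== SOURCE A (Python) =====
-- def _apply_pep8_formatting(code: str) -> str:
--     """
--     Apply basic PEP 8 formatting rules.
--
--     Note: This is a simple implementation. For production use,
--     consider integrating tools like black or autopep8.
--     """
--     lines = code.split('\n')
--     formatted_lines = []
--
--     for line in lines:
--         # Remove trailing whitespace
--         line = line.rstrip()
--
--         # Ensure no more than 2 consecutive blank lines
--         if not line:
--             if len(formatted_lines) >= 2:
--                 if not formatted_lines[-1] and not formatted_lines[-2]: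
--                     continue  # Skip third+ consecutive blank line
--
--         formatted_lines.append(line)
--
--     # Ensure file ends with newline
--     result = '\n'.join(formatted_lines)
--     if result and not result.endswith('\n'):
--         result += '\n'
--
--     return result
-- ===== SOURCE B (Python) =====
-- def _apply_pep8_formatting(code: str) -> str:
--     """Run-based PEP8 cleanup: rstrip every line, then split the lines into maximal
--     runs of blank / non-blank lines, truncate each blank run to its first two lines,
--     and concatenate the runs back."""
--     lines = [l.rstrip() for l in code.split('\n')]
--     formatted = []
--     i, n = 0, len(lines)
--     while i < n:
--         blank = lines[i] == ''
--         j = i + 1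
--         while j < n and (lines[j] == '') == blank:
--             j += 1
--         run = lines[i:j]
--         formatted += run[:2] if blank else run
--         i = j
--     result = '\n'.join(formatted)
--     if result and not result.endswith('\n'):
--         result += '\n'
--     return result
-- ===== Notes on version B (the rewrite author's own statement) =====
-- stated objective: alternative
-- what changed: Instead of A's per-line loop that inspects the last two entries of the output it is building, B first rstrips all lines, then partitions them into maximal runs of blank/non-blank lines and concatenates each run back after truncating every blank run to its first two lines.
import Mathlib
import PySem

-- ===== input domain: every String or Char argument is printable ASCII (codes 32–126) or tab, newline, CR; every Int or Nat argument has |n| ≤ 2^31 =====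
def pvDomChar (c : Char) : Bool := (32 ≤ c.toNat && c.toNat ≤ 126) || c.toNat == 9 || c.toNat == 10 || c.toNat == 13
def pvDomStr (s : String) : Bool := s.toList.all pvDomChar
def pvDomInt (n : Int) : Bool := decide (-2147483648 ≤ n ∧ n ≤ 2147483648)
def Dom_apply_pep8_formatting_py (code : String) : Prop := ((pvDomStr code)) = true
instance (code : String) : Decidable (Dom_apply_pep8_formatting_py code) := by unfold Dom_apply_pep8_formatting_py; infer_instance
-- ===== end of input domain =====

-- B replaces A's per-line loop with lookback into the output it is building by a staged,
-- run-based pipeline: rstrip all lines, split into maximal blank/non-blank runs, truncate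
-- each blank run to its first two lines, concatenate (objective: alternative; same cost).

-- ===== PORT A =====
-- loop body of A: rstrip, then skip a blank line when the last two appended lines are blank
def pvStepA (acc : List String) (line : String) : List String :=
  let l := PySem.Str.rstrip line
  if l = "" ∧ 2 ≤ acc.length ∧ PySem.List.pyGet? acc (-1) = some "" ∧ PySem.List.pyGet? acc (-2) = some "" then
    acc
  else
    acc ++ [l]

def apply_pep8_formatting_py (code : String) : String :=
  let lines := (PySem.Str.split? code "\n").getD []
  let formatted_lines := lines.foldl pvStepA []
  let result := PySem.Str.join "\n" formatted_lines
  if result ≠ "" ∧ PySem.Str.endswith result "\n" = false then result ++ "\n" else result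

-- ===== PORT B =====
-- Source B's outer while loop: take the maximal run of lines with the same blankness as the
-- head (inner while = takeWhile), keep run[:2] for a blank run and the whole run otherwise,
-- continue after the run (i = j  ↔  dropWhile).
def pvFmt : List String → List String
  | [] => []
  | l :: t =>
      (if l = "" then (l :: t.takeWhile (fun x => (x == "") == (l == ""))).take 2
       else l :: t.takeWhile (fun x => (x == "") == (l == ""))) ++
      pvFmt (t.dropWhile (fun x => (x == "") == (l == "")))
termination_by xs => xs.length
decreasing_by
  simpa using Nat.lt_succ_of_le (List.length_dropWhile_le _ _)

def apply_pep8_formatting_py_alt (code : String) : String :=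
  let lines := ((PySem.Str.split? code "\n").getD []).map PySem.Str.rstrip
  let formatted := pvFmt lines
  let result := PySem.Str.join "\n" formatted
  if result ≠ "" ∧ PySem.Str.endswith result "\n" = false then result ++ "\n" else result

-- ===== PRECONDITION & SPEC =====
def Spec_apply_pep8_formatting_py (code : String) (out : String) : Prop := out = apply_pep8_formatting_py_alt code
instance (code : String) (out : String) : Decidable (Spec_apply_pep8_formatting_py code out) := by unfold Spec_apply_pep8_formatting_py; infer_instance

-- ===== CLAIM (what is proved, stated in full; the proofs are below) =====
def Claim_equal_apply_pep8_formatting_py : Prop := ∀ (code : String), Dom_apply_pep8_formatting_py code → Spec_apply_pep8_formatting_py code (apply_pep8_formatting_py code)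

-- ===== LEMMAS AND PROOFS =====

-- A's step on an already-rstripped line
def pvStepA' (acc : List String) (l : String) : List String :=
  if l = "" ∧ 2 ≤ acc.length ∧ PySem.List.pyGet? acc (-1) = some "" ∧ PySem.List.pyGet? acc (-2) = some "" then
    acc
  else
    acc ++ [l]

-- "blank-run counter is 0": output is empty or ends in a non-blank line
def pvOk (acc : List String) : Prop := acc = [] ∨ ∃ s, acc.getLast? = some s ∧ s ≠ ""

lemma pvGetPen (pre : List String) (x : String) :
    PySem.List.pyGet? (pre ++ [x]) (-2) = pre.getLast? := by
  cases pre with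
  | nil =>
    rw [List.nil_append, (PySem.List.pyGet?_eq_none_iff _ _).mpr (by simp [PySem.Raise.InRange])]
    rfl
  | cons y t =>
    rw [PySem.List.pyGet?_neg_ofNat _ 2 (by omega) (by simp)]
    have hlt : (y :: t).length - 1 < (y :: t).length := by simp
    rw [show (y :: t ++ [x]).length - 2 = (y :: t).length - 1 by simp,
        List.getElem?_append_left hlt, List.getLast?_eq_getElem?]

lemma pvStepA'_nonblank (acc : List String) (l : String) (h : l ≠ "") :
    pvStepA' acc l = acc ++ [l] := by
  rw [pvStepA', if_neg (by tauto)]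

lemma pvStepA'_blank_ok (acc : List String) (h : pvOk acc) :
    pvStepA' acc "" = acc ++ [""] := by
  rw [pvStepA', if_neg]
  rintro ⟨-, hlen, hg1, -⟩
  rcases h with rfl | ⟨s, hs, hne⟩
  · simp at hlen
  · rw [PySem.List.pyGet?_neg_one, hs] at hg1
    exact hne (by injection hg1)

lemma pvStepA'_blank_one (pre : List String) (h : pvOk pre) :
    pvStepA' (pre ++ [""]) "" = pre ++ ["", ""] := by
  rw [pvStepA', if_neg]
  · simp
  rintro ⟨-, hlen, -, hg2⟩
  rw [pvGetPen] at hg2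
  rcases h with rfl | ⟨s, hs, hne⟩
  · simp at hlen
  · rw [hs] at hg2
    exact hne (by injection hg2)

lemma pvStepA'_blank_skip (pre : List String) :
    pvStepA' (pre ++ ["", ""]) "" = pre ++ ["", ""] := by
  rw [pvStepA', if_pos]
  refine ⟨rfl, by simp, ?_, ?_⟩
  · rw [PySem.List.pyGet?_neg_one]; simp
  · rw [show pre ++ ["", ""] = (pre ++ [""]) ++ [""] by simp, pvGetPen]; simp

lemma pvFoldl_nonblank (run : List String) (h : ∀ x ∈ run, x ≠ "") :
    ∀ acc, run.foldl pvStepA' acc = acc ++ run := by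
  induction run with
  | nil => intro acc; simp
  | cons y r ih =>
    intro acc
    rw [List.foldl_cons, pvStepA'_nonblank acc y (h y (by simp)),
        ih (fun x hx => h x (by simp [hx]))]
    simp

lemma pvFoldl_skip (run : List String) (h : ∀ x ∈ run, x = "") :
    ∀ pre, run.foldl pvStepA' (pre ++ ["", ""]) = pre ++ ["", ""] := by
  induction run with
  | nil => intro pre; rfl
  | cons y r ih =>
    intro pre
    rw [List.foldl_cons, h y (by simp), pvStepA'_blank_skip,
        ih (fun x hx => h x (by simp [hx]))]

lemma pvFoldl_blank (run : List String) (h : ∀ x ∈ run, x = "") (hne : run ≠ [])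
    (acc : List String) (hok : pvOk acc) :
    run.foldl pvStepA' acc = acc ++ run.take 2 := by
  cases run with
  | nil => exact absurd rfl hne
  | cons y r =>
    have hy : y = "" := h y (by simp)
    subst hy
    rw [List.foldl_cons, pvStepA'_blank_ok acc hok]
    cases r with
    | nil => simp
    | cons z r2 =>
      have hz : z = "" := h z (by simp)
      subst hz
      rw [List.foldl_cons, pvStepA'_blank_one acc hok,
          pvFoldl_skip r2 (fun x hx => h x (by simp [hx])) acc]
      simp

lemma pvHead_dropWhile {α : Type} (p : α → Bool) :
    ∀ (t : List α) (y : α) (ys : List α), t.dropWhile p = y :: ys → p y = false := by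
  intro t
  induction t with
  | nil => intro y ys h; simp [List.dropWhile] at h
  | cons a t2 ih =>
    intro y ys h
    rw [List.dropWhile_cons] at h
    by_cases hp : p a = true
    · rw [if_pos hp] at h; exact ih y ys h
    · rw [if_neg hp] at h
      injection h with h1 _
      rw [← h1]; exact Bool.eq_false_iff.mpr hp

lemma pvMain : ∀ (rl acc : List String), (rl.head? = some "" → pvOk acc) →
    rl.foldl pvStepA' acc = acc ++ pvFmt rl := by
  intro rl
  induction rl using pvFmt.induct with
  | case1 => intro acc _; simp [pvFmt]
  | case2 l t ih =>
    intro acc hok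
    have hsplit : l :: t = (l :: t.takeWhile (fun x => (x == "") == (l == ""))) ++
        t.dropWhile (fun x => (x == "") == (l == "")) := by
      rw [List.cons_append, List.takeWhile_append_dropWhile]
    rw [show pvFmt (l :: t) = (if l = "" then
          (l :: t.takeWhile (fun x => (x == "") == (l == ""))).take 2
        else l :: t.takeWhile (fun x => (x == "") == (l == ""))) ++
          pvFmt (t.dropWhile (fun x => (x == "") == (l == ""))) from by rw [pvFmt]]
    conv_lhs => rw [hsplit]
    rw [List.foldl_append]
    by_cases hl : l = ""
    · subst hl
      have hall : ∀ x ∈ ("" :: t.takeWhile (fun x => (x == "") == ("" == ""))), x = "" := by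
        intro x hx
        rcases List.mem_cons.mp hx with rfl | hx2
        · rfl
        · have := List.mem_takeWhile_imp hx2
          simpa using this
      rw [pvFoldl_blank _ hall (by simp) acc (hok rfl), if_pos rfl]
      rw [ih _ (by
        intro hh
        rcases hd : (t.dropWhile (fun x => (x == "") == ("" == ""))) with _ | ⟨y, ys⟩
        · rw [hd] at hh; simp at hh
        · rw [hd] at hh
          have hpy := pvHead_dropWhile _ t y ys hd
          simp only [List.head?] at hh
          injection hh with h1
          rw [← h1] at hpy
          simp at hpy)]
      rw [List.append_assoc]
    · have hall : ∀ x ∈ (l :: t.takeWhile (fun x => (x == "") == (l == ""))), x ≠ "" := by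
        intro x hx
        rcases List.mem_cons.mp hx with rfl | hx2
        · exact hl
        · have := List.mem_takeWhile_imp hx2
          simp only [beq_iff_eq] at this ⊢
          intro hxe
          rw [hxe] at this
          simp only [beq_self_eq_true] at this
          exact hl (by
            have : (l == "") = true := this.symm
            simpa using this)
      rw [pvFoldl_nonblank _ hall acc, if_neg hl]
      rw [ih _ (by
        intro _
        right
        refine ⟨(l :: t.takeWhile (fun x => (x == "") == (l == ""))).getLast (by simp), ?_, ?_⟩
        · rw [List.getLast?_append, List.getLast?_eq_some_getLast (by simp)]
          rfl
        · exact hall _ (List.getLast_mem _))]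
      rw [List.append_assoc]

-- ===== VERDICT (by name: the statement is the Claim_ definition above) =====
theorem apply_pep8_formatting_py_spec : Claim_equal_apply_pep8_formatting_py := by
  intro code _
  unfold Spec_apply_pep8_formatting_py
  simp only [apply_pep8_formatting_py, apply_pep8_formatting_py_alt]
  have h1 : ((PySem.Str.split? code "\n").getD []).foldl pvStepA [] =
      (((PySem.Str.split? code "\n").getD []).map PySem.Str.rstrip).foldl pvStepA' [] := by
    rw [List.foldl_map]
    rfl
  rw [h1, pvMain _ [] (fun _ => Or.inl rfl), List.nil_append]
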